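-- pv_equiv track=rewrite | github.com/tsirleo/PythonIntro2023 | HW_04 (Numbers and strings)/MultTable.py | count_num_cols
-- ===== SOURCE A (Python) =====
-- def count_num_cols(num, max_line_length):
--     col_width = len(str(num)) * 2 + len(str(num * num)) + len(".*.") + len(".=.")
--     _row_length = 0
--     _num_of_cols = 0
--
--     while _row_length <= max_line_length:
--         if _row_length + col_width <= max_line_length:
--             _num_of_cols += 1
--             _row_length += (col_width + len(".|."))
--         else:
--             break
--
--     return _num_of_cols
-- ===== SOURCE B (Python) =====
-- def count_num_cols(num, max_line_length):
--     col_width = len(str(num)) * 2 + len(str(num * num)) + len(".*.") + len(".=.")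
--     return max((max_line_length + 3) // (col_width + 3), 0)
-- ===== Notes on version B (the rewrite author's own statement) =====
-- stated objective: faster
-- what changed: Replaced the column-counting while-loop by the closed-form floor division max((max_line_length + 3) // (col_width + 3), 0).
import Mathlib
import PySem

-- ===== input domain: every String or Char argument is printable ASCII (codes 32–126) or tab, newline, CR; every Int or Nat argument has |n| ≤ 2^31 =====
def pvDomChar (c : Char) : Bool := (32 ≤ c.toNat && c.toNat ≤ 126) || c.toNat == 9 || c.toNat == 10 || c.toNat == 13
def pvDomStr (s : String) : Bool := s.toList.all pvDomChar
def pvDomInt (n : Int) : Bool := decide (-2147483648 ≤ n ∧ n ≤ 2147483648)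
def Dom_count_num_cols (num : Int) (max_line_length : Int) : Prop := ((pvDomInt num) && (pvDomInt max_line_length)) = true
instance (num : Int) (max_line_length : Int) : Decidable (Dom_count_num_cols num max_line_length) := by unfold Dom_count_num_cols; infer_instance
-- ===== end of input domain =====

-- B replaces A's column-counting while-loop by a single closed-form floor division (faster: O(1) vs O(answer)).

-- ===== PORT A =====
-- the while-loop of A; the positivity hypothesis only serves termination
def countColsLoop (col_width L row n : Int) (hw : 0 < col_width) : Int :=
  if row ≤ L then
    if row + col_width ≤ L then
      countColsLoop col_width L (row + (col_width + PySem.Str.len ".|.")) (n + 1) hw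
    else n
  else n
termination_by (L + 1 - row).toNat
decreasing_by
  have h3 : PySem.Str.len ".|." = 3 := by decide
  rw [h3]
  omega

theorem count_num_cols_width_pos (num : Int) :
    0 < PySem.Str.len (PySem.Int.toStr num) * 2 + PySem.Str.len (PySem.Int.toStr (num * num)) +
        PySem.Str.len ".*." + PySem.Str.len ".=." := by
  have h1 : 0 ≤ PySem.Str.len (PySem.Int.toStr num) := by
    simp [PySem.Str.len_eq]
  have h2 : 0 ≤ PySem.Str.len (PySem.Int.toStr (num * num)) := by
    simp [PySem.Str.len_eq]
  have h3 : PySem.Str.len ".*." = 3 := by decide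
  have h4 : PySem.Str.len ".=." = 3 := by decide
  omega

def count_num_cols (num : Int) (max_line_length : Int) : Int :=
  countColsLoop
    (PySem.Str.len (PySem.Int.toStr num) * 2 + PySem.Str.len (PySem.Int.toStr (num * num)) +
      PySem.Str.len ".*." + PySem.Str.len ".=.")
    max_line_length 0 0 (count_num_cols_width_pos num)

-- ===== PORT B =====
def count_num_cols_alt (num : Int) (max_line_length : Int) : Int :=
  let col_width := PySem.Str.len (PySem.Int.toStr num) * 2 +
    PySem.Str.len (PySem.Int.toStr (num * num)) + PySem.Str.len ".*." + PySem.Str.len ".=."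
  max (PySem.Int.floordiv (max_line_length + 3) (col_width + 3)) 0

-- ===== PRECONDITION & SPEC =====
def Spec_count_num_cols (num : Int) (max_line_length : Int) (out : Int) : Prop := out = count_num_cols_alt num max_line_length
instance (num : Int) (max_line_length : Int) (out : Int) : Decidable (Spec_count_num_cols num max_line_length out) := by unfold Spec_count_num_cols; infer_instance

-- ===== CLAIM (what is proved, stated in full; the proofs are below) =====
def Claim_equal_count_num_cols : Prop := ∀ (num : Int) (max_line_length : Int), Dom_count_num_cols num max_line_length → Spec_count_num_cols num max_line_length (count_num_cols num max_line_length)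

-- ===== LEMMAS AND PROOFS =====

theorem countColsLoop_eq (w L : Int) (hw : 0 < w) :
    ∀ (m : Nat) (row n : Int), (L + 1 - row).toNat ≤ m →
      countColsLoop w L row n hw = n + max (PySem.Int.floordiv (L - row + 3) (w + 3)) 0 := by
  intro m
  induction m with
  | zero =>
    intro row n hm
    have hrow : L < row := by omega
    rw [countColsLoop]
    have hlt : PySem.Int.floordiv (L - row + 3) (w + 3) < 1 := by
      rw [PySem.Int.floordiv_lt_iff_lt_mul (by omega)]
      omega
    simp only [if_neg (by omega : ¬ row ≤ L)]
    omega
  | succ m ih =>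
    intro row n hm
    rw [countColsLoop]
    have h3 : PySem.Str.len ".|." = 3 := by decide
    by_cases hle : row ≤ L
    · by_cases hfit : row + w ≤ L
      · simp only [if_pos hle, if_pos hfit, h3]
        rw [ih (row + (w + 3)) (n + 1) (by omega)]
        have hnum : L - row + 3 = (L - (row + (w + 3)) + 3) + (w + 3) := by ring
        have hdiv : PySem.Int.floordiv (L - row + 3) (w + 3) =
            PySem.Int.floordiv (L - (row + (w + 3)) + 3) (w + 3) + 1 := by
          rw [hnum, PySem.Int.floordiv_eq_ediv_of_pos (by omega),
            PySem.Int.floordiv_eq_ediv_of_pos (by omega)]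
          simpa using Int.add_mul_ediv_right (L - (row + (w + 3)) + 3) 1 (by omega : w + 3 ≠ 0)
        have hnn : 0 ≤ PySem.Int.floordiv (L - (row + (w + 3)) + 3) (w + 3) := by
          rw [PySem.Int.floordiv_eq_ediv_of_pos (by omega)]
          exact Int.ediv_nonneg (by omega) (by omega)
        omega
      · simp only [if_pos hle, if_neg hfit]
        have hlt : PySem.Int.floordiv (L - row + 3) (w + 3) < 1 := by
          rw [PySem.Int.floordiv_lt_iff_lt_mul (by omega)]
          omega
        omega
    · simp only [if_neg hle]
      have hlt : PySem.Int.floordiv (L - row + 3) (w + 3) < 1 := by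
        rw [PySem.Int.floordiv_lt_iff_lt_mul (by omega)]
        omega
      omega

-- ===== VERDICT (by name: the statement is the Claim_ definition above) =====
theorem count_num_cols_spec : Claim_equal_count_num_cols := by
  intro num L _
  unfold Spec_count_num_cols count_num_cols count_num_cols_alt
  rw [countColsLoop_eq _ _ _ (L + 1 - 0).toNat 0 0 (le_refl _)]
  simp only [sub_zero]
  omega
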